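-- pv_equiv track=rewrite | github.com/smsxgz/euler_project | problems/problem_73/Counting_fractions_in_a_range.py | fraction_less
-- ===== SOURCE A (Python) =====
-- def fraction_less(D, mobius, mul=2):
--     """ number of the fractions such that p/q <= 1/mul """
--     res = 0
--     for d in range(1, D + 1):
--         i, r = divmod(D // d, mul)
--
--         s = i * (i + 1) // 2 * mul
--         s = s - (mul - 1 - r) * i
--         res += mobius[d] * s
--
--     return res
-- ===== SOURCE B (Python) =====
-- def fraction_less(D, mobius, mul=2):
--     """ number of the fractions such that p/q <= 1/mul """
--     res = 0
--     for d in range(1, D + 1):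
--         s = 0
--         for q in range(1, D // d + 1):
--             s += q // mul
--         res += mobius[d] * s
--     return res
-- ===== Notes on version B (the rewrite author's own statement) =====
-- stated objective: simpler
-- what changed: replaces the opaque closed-form divmod arithmetic for sum_{q=1}^{D//d} floor(q/mul) by a direct accumulating inner loop over q
-- outside the precondition, e.g. on fraction_less(1, [0, -3], -1): A returns 6, B returns 3
import Mathlib
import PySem

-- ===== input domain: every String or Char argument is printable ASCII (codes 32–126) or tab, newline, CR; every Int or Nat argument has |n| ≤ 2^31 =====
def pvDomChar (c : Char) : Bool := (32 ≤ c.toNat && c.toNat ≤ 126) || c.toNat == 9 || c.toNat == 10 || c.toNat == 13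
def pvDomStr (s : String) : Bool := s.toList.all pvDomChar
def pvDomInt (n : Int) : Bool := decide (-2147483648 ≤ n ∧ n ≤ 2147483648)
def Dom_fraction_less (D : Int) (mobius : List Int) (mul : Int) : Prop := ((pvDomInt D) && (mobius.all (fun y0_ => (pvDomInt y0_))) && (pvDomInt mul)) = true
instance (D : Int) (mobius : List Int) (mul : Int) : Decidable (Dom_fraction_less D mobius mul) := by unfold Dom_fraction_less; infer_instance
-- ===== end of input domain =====

-- B replaces A's closed-form divmod arithmetic for sum_{q=1}^{D//d} floor(q/mul) by a
-- direct accumulating inner loop (simpler to read; not faster).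

-- ===== PORT A =====
def fraction_less (D : Int) (mobius : List Int) (mul : Int) : Int :=
  (PySem.List.pyRange 1 (D + 1) 1).foldl
    (fun res d =>
      let q := PySem.Int.floordiv D d
      let i := PySem.Int.floordiv q mul
      let r := PySem.Int.mod q mul
      let s := PySem.Int.floordiv (i * (i + 1)) 2 * mul
      let s := s - (mul - 1 - r) * i
      res + PySem.List.pyGetD mobius d 0 * s) 0

-- ===== PORT B =====
def fraction_less_alt (D : Int) (mobius : List Int) (mul : Int) : Int :=
  (PySem.List.pyRange 1 (D + 1) 1).foldl
    (fun res d =>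
      let s := (PySem.List.pyRange 1 (PySem.Int.floordiv D d + 1) 1).foldl
        (fun s q => s + PySem.Int.floordiv q mul) 0
      res + PySem.List.pyGetD mobius d 0 * s) 0

-- ===== PRECONDITION & SPEC =====
-- Pre_ restricts to the function's natural domain mul >= 1 (for mul = 0 A raises
-- ZeroDivisionError; for mul <= -1 A's closed form no longer equals the floor-sum it
-- abbreviates, so the corner is excluded as outside the natural domain), and requires
-- D < len(mobius) so mobius[d] does not raise IndexError; for D <= 0 the loop is empty
-- and A returns 0 for any mul/mobius.
def Pre_fraction_less (D : Int) (mobius : List Int) (mul : Int) : Prop :=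
  D ≤ 0 ∨ (1 ≤ mul ∧ D < (mobius.length : Int))
instance (D : Int) (mobius : List Int) (mul : Int) : Decidable (Pre_fraction_less D mobius mul) := by unfold Pre_fraction_less; infer_instance

def pvWitness_fraction_less : Int × List Int × Int := (4, [0, 1, -1, -1, 0], 2)

def Spec_fraction_less (D : Int) (mobius : List Int) (mul : Int) (out : Int) : Prop := out = fraction_less_alt D mobius mul
instance (D : Int) (mobius : List Int) (mul : Int) (out : Int) : Decidable (Spec_fraction_less D mobius mul out) := by unfold Spec_fraction_less; infer_instance

-- ===== CLAIM (what is proved, stated in full; the proofs are below) =====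
def Claim_equal_fraction_less : Prop := ∀ (D : Int) (mobius : List Int) (mul : Int), Dom_fraction_less D mobius mul → Pre_fraction_less D mobius mul → Spec_fraction_less D mobius mul (fraction_less D mobius mul)

-- ===== LEMMAS AND PROOFS =====

-- arithmetic step of the closed form: going from t to t+1 adds floor((t+1)/mul)
lemma closed_succ (mul t : Int) (hm : 1 ≤ mul) :
    PySem.Int.floordiv (PySem.Int.floordiv (t + 1) mul * (PySem.Int.floordiv (t + 1) mul + 1)) 2 * mul
      - (mul - 1 - PySem.Int.mod (t + 1) mul) * PySem.Int.floordiv (t + 1) mul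
    = (PySem.Int.floordiv (PySem.Int.floordiv t mul * (PySem.Int.floordiv t mul + 1)) 2 * mul
      - (mul - 1 - PySem.Int.mod t mul) * PySem.Int.floordiv t mul)
      + PySem.Int.floordiv (t + 1) mul := by
  have hm0 : (0:Int) < mul := by omega
  rw [PySem.Int.floordiv_eq_ediv_of_pos hm0, PySem.Int.floordiv_eq_ediv_of_pos hm0,
    PySem.Int.mod_eq_emod_of_pos hm0, PySem.Int.mod_eq_emod_of_pos hm0,
    PySem.Int.floordiv_eq_ediv_of_pos (by norm_num : (0:Int) < 2),
    PySem.Int.floordiv_eq_ediv_of_pos (by norm_num : (0:Int) < 2)]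
  set i := t / mul with hi
  set r := t % mul with hr
  have hdm : mul * i + r = t := Int.mul_ediv_add_emod t mul
  have hr0 : 0 ≤ r := Int.emod_nonneg t (by omega)
  have hrlt : r < mul := Int.emod_lt_of_pos t hm0
  by_cases hc : r + 1 < mul
  · -- same quotient, remainder grows by one
    have hstep : t + 1 = (r + 1) + mul * i := by omega
    have hq : (t + 1) / mul = i := by
      rw [hstep, Int.add_mul_ediv_left _ _ (by omega : mul ≠ 0),
        Int.ediv_eq_zero_of_lt (by omega) hc, zero_add]
    have hrm : (t + 1) % mul = r + 1 := by
      rw [hstep, Int.add_mul_emod_self_left, Int.emod_eq_of_lt (by omega) hc]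
    rw [hq, hrm]; ring
  · -- remainder wraps, quotient increments
    have hrm1 : r = mul - 1 := by omega
    have ht1 : t + 1 = mul * (i + 1) := by rw [mul_add, mul_one]; omega
    have hq : (t + 1) / mul = i + 1 := by
      rw [ht1, Int.mul_ediv_cancel_left _ (by omega : mul ≠ 0)]
    have hrm : (t + 1) % mul = 0 := by
      rw [ht1, Int.mul_emod_right]
    rw [hq, hrm, hrm1]
    have hT : ((i + 1) * (i + 1 + 1)) / 2 = (i * (i + 1)) / 2 + (i + 1) := by
      have : (i + 1) * (i + 1 + 1) = i * (i + 1) + (i + 1) * 2 := by ring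
      rw [this, Int.add_mul_ediv_right _ _ (by norm_num : (2:Int) ≠ 0)]
    rw [hT]; ring

-- the inner accumulating loop of B equals A's closed form, for every bound t ≥ 0
lemma inner_sum_eq (mul : Int) (hm : 1 ≤ mul) : ∀ (t : Nat),
    (PySem.List.pyRange 1 ((t : Int) + 1) 1).foldl (fun s q => s + PySem.Int.floordiv q mul) 0
    = PySem.Int.floordiv (PySem.Int.floordiv (t : Int) mul * (PySem.Int.floordiv (t : Int) mul + 1)) 2 * mul
      - (mul - 1 - PySem.Int.mod (t : Int) mul) * PySem.Int.floordiv (t : Int) mul := by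
  intro t
  induction t with
  | zero =>
    simp [PySem.Int.floordiv, PySem.Int.mod]
  | succ n ih =>
    have hcast : ((n + 1 : Nat) : Int) = (n : Int) + 1 := by push_cast; ring
    rw [hcast, PySem.List.pyRange_one_succ_right (by omega : (1:Int) ≤ (n : Int) + 1),
      List.foldl_append]
    simp only [List.foldl_cons, List.foldl_nil]
    rw [ih, closed_succ mul (n : Int) hm]

-- ===== VERDICT (by name: the statement is the Claim_ definition above) =====
theorem fraction_less_spec : Claim_equal_fraction_less := by
  intro D mobius mul _ hpre
  unfold Spec_fraction_less fraction_less fraction_less_alt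
  rcases hpre with hD | ⟨hm, _⟩
  · rw [PySem.List.pyRange_one_eq_nil (by omega : D + 1 ≤ 1)]; rfl
  · apply PySem.List.foldl_congr_mem
    intro acc d hd
    rw [PySem.List.mem_pyRange_one] at hd
    have hd1 : (1:Int) ≤ d := hd.1
    have hn0 : 0 ≤ PySem.Int.floordiv D d := by
      rw [PySem.Int.floordiv_eq_ediv_of_pos (by omega : (0:Int) < d)]
      exact Int.ediv_nonneg (by omega) (by omega)
    obtain ⟨t, ht⟩ : ∃ t : Nat, PySem.Int.floordiv D d = (t : Int) :=
      ⟨(PySem.Int.floordiv D d).toNat, (Int.toNat_of_nonneg hn0).symm⟩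
    simp only [ht]
    rw [inner_sum_eq mul hm t]
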